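-- pv_equiv track=rewrite | github.com/ezedeem223/medical-ecg-image-to-signal-reconstruction-pipeline | archive/provenance/scripts/generate_file_audit.py | infer_key_family
-- ===== SOURCE A (Python) =====
-- PARAMETER_TERMS = {"weight", "bias", "running_mean", "running_var", "num_batches_tracked"}
--
-- def infer_key_family(key: str) -> str:
--     parts = key.split(".")
--     collected = []
--     for part in parts:
--         if part.isdigit():
--             continue
--         if part in PARAMETER_TERMS and collected:
--             break
--         collected.append(part)
--         if len(collected) == 2:
--             break
--     return ".".join(collected) if collected else parts[0]
-- ===== SOURCE B (Python) =====
-- PARAMETER_TERMS = {"weight", "bias", "running_mean", "running_var", "num_batches_tracked"}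
--
--
-- def _next_name(rest):
--     """Stream tokens off `rest` with partition: return (first non-digit token,
--     text after it or None if it was the last token); (None, None) if all digits."""
--     while True:
--         head, sep, rest = rest.partition(".")
--         if not head.isdigit():
--             return head, (rest if sep else None)
--         if not sep:
--             return None, None
--
--
-- def infer_key_family(key: str) -> str:
--     first, rest = _next_name(key)
--     if first is None:
--         return key.partition(".")[0]
--     if rest is None:
--         return first
--     second, _ = _next_name(rest)
--     if second is None or second in PARAMETER_TERMS:
--         return first
--     return first + "." + second
-- ===== Notes on version B (the rewrite author's own statement) =====
-- stated objective: alternative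
-- what changed: B never builds the parts list: it streams tokens off the key with str.partition via a _next_name helper, running two staged searches (first non-digit name, then second name) and assembling the result by concatenation instead of A's split + accumulate-and-break loop + join.
import Mathlib
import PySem

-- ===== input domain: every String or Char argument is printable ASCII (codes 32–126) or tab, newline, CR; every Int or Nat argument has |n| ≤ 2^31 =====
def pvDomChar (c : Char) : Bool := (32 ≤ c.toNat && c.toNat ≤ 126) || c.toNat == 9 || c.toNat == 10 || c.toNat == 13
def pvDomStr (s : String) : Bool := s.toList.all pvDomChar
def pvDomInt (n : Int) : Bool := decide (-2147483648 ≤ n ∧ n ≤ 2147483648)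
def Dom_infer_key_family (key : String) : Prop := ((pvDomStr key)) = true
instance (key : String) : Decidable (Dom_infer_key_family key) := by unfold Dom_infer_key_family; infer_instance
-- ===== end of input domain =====

-- B streams tokens off the key with partition (two staged name searches, no parts list, no join); same cost, alternative decomposition.


def pvParameterTerms : List String := ["weight", "bias", "running_mean", "running_var", "num_batches_tracked"]

-- ===== PORT A =====
-- the for-loop over parts with accumulator `collected`; `break` = return the accumulator
def pvLoopA : List String → List String → List String
  | [], collected => collected
  | part :: rest, collected =>
      if PySem.Str.strIsdigit part then pvLoopA rest collected
      else if pvParameterTerms.contains part && !collected.isEmpty then collected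
      else
        let collected' := collected ++ [part]
        if collected'.length == 2 then collected' else pvLoopA rest collected'

def infer_key_family (key : String) : String :=
  let parts := (PySem.Str.split? key ".").getD []   -- sep is the literal "." ≠ "", so split? is always some
  let collected := pvLoopA parts []
  if !collected.isEmpty then PySem.Str.join "." collected else parts.headD ""

-- ===== PORT B =====
def pvParameterTermsC : List (List Char) := pvParameterTerms.map String.toList

-- B's `_next_name` while-loop: peel tokens off with partition until a non-digit one
-- (first component) and the text after it (`none` = it was the last token);
-- (none, none) when every remaining token is a digit run.
def pvNextName (rest : List Char) : Option (List Char) × Option (List Char) :=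
  let head := rest.takeWhile (· ≠ '.')
  let r := rest.dropWhile (· ≠ '.')
  if PySem.Chars.strIsdigit head then
    match h : r with
    | [] => (none, none)
    | _ :: t => pvNextName t
  else
    (some head, match r with | [] => none | _ :: t => some t)
termination_by rest.length
decreasing_by
  have h1 : r.length ≤ rest.length := (List.dropWhile_sublist _).length_le
  simp only [h] at h1
  simp at h1 ⊢
  omega

def infer_key_family_alt (key : String) : String :=
  match pvNextName key.toList with
  | (none, _) => String.ofList (key.toList.takeWhile (· ≠ '.'))   -- key.partition(".")[0]
  | (some first, none) => String.ofList first
  | (some first, some rest) =>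
      match pvNextName rest with
      | (none, _) => String.ofList first
      | (some second, _) =>
          if pvParameterTermsC.contains second then String.ofList first
          else String.ofList (first ++ '.' :: second)

-- ===== PRECONDITION & SPEC =====
def Spec_infer_key_family (key : String) (out : String) : Prop := out = infer_key_family_alt key
instance (key : String) (out : String) : Decidable (Spec_infer_key_family key out) := by unfold Spec_infer_key_family; infer_instance

-- ===== CLAIM =====
def Claim_equal_infer_key_family : Prop := ∀ (key : String), Dom_infer_key_family key → Spec_infer_key_family key (infer_key_family key)

-- ===== LEMMAS AND PROOFS =====
-- A's loop with one element collected: appends the first non-digit, non-term part if any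
theorem pvLoopA_one (ps : List String) (c : String) :
    pvLoopA ps [c] =
      match ps.filter (fun p => !PySem.Str.strIsdigit p) with
      | [] => [c]
      | n1 :: _ => if pvParameterTerms.contains n1 then [c] else [c, n1] := by
  induction ps with
  | nil => simp [pvLoopA]
  | cons p rest ih =>
      by_cases hd : PySem.Str.strIsdigit p = true
      · rw [pvLoopA, if_pos hd, List.filter_cons_of_neg (by simpa using hd)]
        exact ih
      · rw [pvLoopA, if_neg hd, List.filter_cons_of_pos (by simpa using hd)]
        by_cases ht : p ∈ pvParameterTerms <;> simp [ht]

-- A's loop from scratch, characterised by the digit-free sublist of parts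
theorem pvLoopA_nil (ps : List String) :
    pvLoopA ps [] =
      match ps.filter (fun p => !PySem.Str.strIsdigit p) with
      | [] => []
      | [n0] => [n0]
      | n0 :: n1 :: _ => if pvParameterTerms.contains n1 then [n0] else [n0, n1] := by
  induction ps with
  | nil => simp [pvLoopA]
  | cons p rest ih =>
      by_cases hd : PySem.Str.strIsdigit p = true
      · rw [pvLoopA, if_pos hd, List.filter_cons_of_neg (by simpa using hd)]
        exact ih
      · rw [pvLoopA, if_neg hd, List.filter_cons_of_pos (by simpa using hd)]
        simp only [List.isEmpty_nil, Bool.not_true, Bool.and_false, List.nil_append,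
          if_neg (by decide : ¬(false = true)), if_neg (by simp : ¬(([p].length == 2) = true))]
        rw [pvLoopA_one rest p]
        cases h : rest.filter (fun p => !PySem.Str.strIsdigit p) with
        | nil => simp
        | cons n1 t => by_cases ht : n1 ∈ pvParameterTerms <;> simp [ht]

-- tokenization of a char list at '.' (spec of split(".")), by structural recursion
def pvTok : List Char → List (List Char)
  | [] => [[]]
  | c :: cs =>
      if c = '.' then [] :: pvTok cs
      else match pvTok cs with
        | [] => [[c]]
        | t :: ts => (c :: t) :: ts

theorem pvTok_ne_nil (cs : List Char) : pvTok cs ≠ [] := by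
  cases cs with
  | nil => simp [pvTok]
  | cons c cs =>
      simp only [pvTok]
      split
      · simp
      · split <;> simp

-- splitOn.go with separator ['.'] computes pvTok (loop invariant)
theorem pvGo_eq (fuel : Nat) (l cur : List Char) (acc : List (List Char))
    (hf : l.length < fuel) :
    PySem.Chars.splitOn.go ['.'] fuel l cur acc =
      acc.reverse ++ (match pvTok l with
        | [] => [cur.reverse]
        | t :: ts => (cur.reverse ++ t) :: ts) := by
  induction fuel generalizing l cur acc with
  | zero => omega
  | succ fuel ih =>
      cases l with
      | nil => simp [PySem.Chars.splitOn.go, pvTok]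
      | cons c rest =>
          rw [PySem.Chars.splitOn.go]
          by_cases hc : c = '.'
          · subst hc
            have hp : List.isPrefixOf ['.'] ('.' :: rest) = true := by
              simp [List.isPrefixOf]
            rw [if_pos hp]
            simp only [List.length_singleton, List.drop_succ_cons, List.drop_zero]
            rw [ih rest [] (cur.reverse :: acc) (by simp at hf ⊢; omega)]
            simp only [pvTok]
            cases h : pvTok rest with
            | nil => exact absurd h (pvTok_ne_nil rest)
            | cons t ts => simp
          · have hp : List.isPrefixOf ['.'] (c :: rest) = false := by
              simp [List.isPrefixOf]
              exact fun h => absurd h.symm hc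
            rw [if_neg (by simp [hp])]
            rw [ih rest (c :: cur) acc (by simp at hf ⊢; omega)]
            simp only [pvTok, if_neg hc]
            cases h : pvTok rest with
            | nil => exact absurd h (pvTok_ne_nil rest)
            | cons t ts => simp

theorem pvSplitOn_eq (cs : List Char) : PySem.Chars.splitOn cs ['.'] = pvTok cs := by
  unfold PySem.Chars.splitOn
  rw [pvGo_eq (cs.length + 1) cs [] [] (Nat.lt_succ_self _)]
  cases h : pvTok cs with
  | nil => exact absurd h (pvTok_ne_nil cs)
  | cons t ts => simp

-- partition characterisation of pvTok
theorem pvTok_partition (cs : List Char) :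
    pvTok cs = (cs.takeWhile (· ≠ '.')) ::
      (match cs.dropWhile (· ≠ '.') with | [] => [] | _ :: t => pvTok t) := by
  induction cs with
  | nil => simp [pvTok]
  | cons c cs ih =>
      by_cases hc : c = '.'
      · subst hc
        simp [pvTok]
      · simp only [pvTok, if_neg hc, List.takeWhile_cons, List.dropWhile_cons]
        rw [ih]
        simp [hc]

-- first non-digit token of a token list, with the remaining tokens
def pvFirstName : List (List Char) → Option (List Char × List (List Char))
  | [] => none
  | t :: ts => if PySem.Chars.strIsdigit t then pvFirstName ts else some (t, ts)

-- the digit-free sublist of a token list, through pvFirstName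
theorem pvFirstName_filter (toks : List (List Char)) :
    match pvFirstName toks with
    | none => toks.filter (fun t => !PySem.Chars.strIsdigit t) = []
    | some (t, ts) =>
        toks.filter (fun t => !PySem.Chars.strIsdigit t) =
          t :: ts.filter (fun t => !PySem.Chars.strIsdigit t) := by
  induction toks with
  | nil => simp [pvFirstName]
  | cons t ts ih =>
      by_cases hd : PySem.Chars.strIsdigit t = true
      · have hfc : List.filter (fun t => !PySem.Chars.strIsdigit t) (t :: ts) =
            List.filter (fun t => !PySem.Chars.strIsdigit t) ts :=
          List.filter_cons_of_neg (by simp [hd])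
        simp only [pvFirstName, if_pos hd, hfc]
        exact ih
      · simp [pvFirstName, hd]


-- pvNextName computes pvFirstName of the tokenization
theorem pvNextName_eq (cs : List Char) :
    match pvFirstName (pvTok cs) with
    | none => pvNextName cs = (none, none)
    | some (t, ts) =>
        (pvNextName cs).1 = some t ∧
        (match (pvNextName cs).2 with
          | none => ts = []
          | some r => pvTok r = ts) := by
  induction hn : cs.length using Nat.strong_induction_on generalizing cs with
  | _ n ih =>
  subst hn
  rw [pvNextName, pvTok_partition cs]
  by_cases hd : PySem.Chars.strIsdigit (cs.takeWhile (· ≠ '.')) = true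
  · rw [if_pos hd]
    simp only [ne_eq, decide_not] at hd
    cases hr : cs.dropWhile (· ≠ '.') with
    | nil => simp [pvFirstName, hd]
    | cons c t =>
        have hlen : t.length < cs.length := by
          have h1 : (cs.dropWhile (· ≠ '.')).length ≤ cs.length :=
            (List.dropWhile_sublist _).length_le
          rw [hr] at h1; simp at h1; omega
        have := ih t.length hlen t rfl
        simpa [pvFirstName, hd] using this
  · rw [if_neg hd]
    simp only [ne_eq, decide_not] at hd
    cases hr : cs.dropWhile (· ≠ '.') with
    | nil => simp [pvFirstName, hd]
    | cons c t => simp [pvFirstName, hd]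

-- membership in the term set transfers between the String and the char-list tables
theorem pvContains_map_toList (L : List String) (c : List Char) :
    (L.map String.toList).contains c = L.contains (String.ofList c) := by
  induction L with
  | nil => rfl
  | cons s L ih =>
      simp only [List.map_cons, List.contains_cons, ih]
      congr 1
      cases h : c == s.toList with
      | true =>
          simp at h
          subst h
          simp
      | false =>
          simp at h
          symm
          simp only [beq_eq_false_iff_ne, ne_eq]
          intro hs
          exact h (by rw [← hs]; simp)

theorem pvTerms_contains (c : List Char) :
    pvParameterTerms.contains (String.ofList c) = pvParameterTermsC.contains c := by
  rw [pvParameterTermsC, pvContains_map_toList]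

-- joining one / two parts with "."
theorem pvJoin_one (a : List Char) :
    PySem.Str.join "." [String.ofList a] = String.ofList a := by
  simp only [PySem.Str.join, String.toList_ofList, List.map_cons, List.map_nil,
    PySem.Chars.join_singleton]

theorem pvJoin_two (a b : List Char) :
    PySem.Str.join "." [String.ofList a, String.ofList b] = String.ofList (a ++ '.' :: b) := by
  simp only [PySem.Str.join, String.toList_ofList, List.map_cons, List.map_nil,
    PySem.Chars.join_cons_cons, PySem.Chars.join_singleton]
  congr 1
  simp

-- ===== VERDICT =====
theorem infer_key_family_spec : Claim_equal_infer_key_family := by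
  intro key _
  unfold Spec_infer_key_family infer_key_family infer_key_family_alt
  have hsplit : (PySem.Str.split? key ".").getD [] = (pvTok key.toList).map String.ofList := by
    simp [PySem.Str.split?, PySem.Chars.split?, pvSplitOn_eq]
  rw [hsplit]
  simp only [pvLoopA_nil]
  have hfilter :
      ((pvTok key.toList).map String.ofList).filter (fun p => !PySem.Str.strIsdigit p) =
        ((pvTok key.toList).filter (fun t => !PySem.Chars.strIsdigit t)).map String.ofList := by
    rw [List.filter_map]
    congr 1
    apply List.filter_congr
    intro t _
    simp [Function.comp, PySem.Str.strIsdigit]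
  rw [hfilter]
  have h1 := pvNextName_eq key.toList
  have hfl := pvFirstName_filter (pvTok key.toList)
  cases hf1 : pvFirstName (pvTok key.toList) with
  | none =>
      rw [hf1] at h1 hfl
      simp only at h1 hfl
      rw [hfl, h1]
      simp only [List.map_nil]
      cases htk : pvTok key.toList with
      | nil => exact absurd htk (pvTok_ne_nil key.toList)
      | cons t ts =>
          have hpt := pvTok_partition key.toList
          rw [htk] at hpt
          have hhead : t = key.toList.takeWhile (· ≠ '.') := (List.cons.injEq _ _ _ _ ▸ hpt).1
          simp [hhead]
  | some pair =>
      obtain ⟨t0, ts0⟩ := pair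
      rw [hf1] at h1 hfl
      simp only at h1 hfl
      obtain ⟨hfst, hsnd⟩ := h1
      rw [hfl]
      have hpeta := Prod.mk.eta (p := pvNextName key.toList)
      cases hn2 : (pvNextName key.toList).2 with
      | none =>
          rw [hn2] at hsnd
          have hpair : pvNextName key.toList = (some t0, none) := by rw [← hpeta, hfst, hn2]
          rw [hpair, hsnd]
          simpa using pvJoin_one t0
      | some r =>
          rw [hn2] at hsnd
          have hpair : pvNextName key.toList = (some t0, some r) := by rw [← hpeta, hfst, hn2]
          rw [hpair]
          have h2 := pvNextName_eq r
          rw [hsnd] at h2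
          have hfl2 := pvFirstName_filter ts0
          cases hf2 : pvFirstName ts0 with
          | none =>
              rw [hf2] at h2 hfl2
              simp only at h2 hfl2
              rw [hfl2]
              simp only [h2, List.map_cons, List.map_nil]
              simpa using pvJoin_one t0
          | some pair2 =>
              obtain ⟨t1, ts1⟩ := pair2
              rw [hf2] at h2 hfl2
              simp only at h2 hfl2
              rw [hfl2]
              cases hp2 : pvNextName r with
              | mk a b =>
                  have ha : a = some t1 := by rw [hp2] at h2; exact h2.1
                  subst ha
                  simp only [hp2, List.map_cons]
                  by_cases ht : pvParameterTermsC.contains t1 = true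
                  · have ht' : pvParameterTerms.contains (String.ofList t1) = true := by
                      rw [pvTerms_contains]; exact ht
                    simp only [ht, ht', if_pos]
                    simpa [ht] using pvJoin_one t0
                  · have ht' : pvParameterTerms.contains (String.ofList t1) = false := by
                      rw [pvTerms_contains]; exact (by simpa using ht)
                    simp only [ht, ht']
                    simpa [ht] using pvJoin_two t0 t1
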